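-- pv_equiv track=rewrite | github.com/athifer/biodsjobs | backend/create_master_lookup.py | get_best_url_for_company
-- ===== SOURCE A (Python) =====
-- def get_best_url_for_company(company_info):
--     """Select the best URL for a company from multiple options"""
--     urls = list(company_info['urls'])
--     if not urls:
--         return None
--
--     if len(urls) == 1:
--         return urls[0]
--
--     # Preference order for URL selection
--     url_preferences = [
--         'boards.greenhouse.io',
--         'job-boards.greenhouse.io',
--         'jobs.lever.co',
--         'myworkdayjobs.com',
--         'careers.com',
--         'jobs.com',
--         'bamboohr.com',
--         'workatastartup.com',
--         'wellfound.com'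
--     ]
--
--     # Sort URLs by preference
--     for preference in url_preferences:
--         for url in urls:
--             if preference in url:
--                 return url
--
--     # If no preference matches, return the first HTTPS URL
--     for url in urls:
--         if url.startswith('https://'):
--             return url
--
--     return urls[0]
-- ===== SOURCE B (Python) =====
-- def get_best_url_for_company(company_info):
--     """Select the best URL for a company from multiple options"""
--     urls = list(company_info['urls'])
--     if not urls:
--         return None
--
--     url_preferences = [
--         'boards.greenhouse.io',
--         'job-boards.greenhouse.io',
--         'jobs.lever.co',
--         'myworkdayjobs.com',
--         'careers.com',
--         'jobs.com',
--         'bamboohr.com',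
--         'workatastartup.com',
--         'wellfound.com'
--     ]
--
--     def key(url):
--         # rank = index of the first preference contained in the url;
--         # unmatched https urls rank after all preferences, others last
--         for i, p in enumerate(url_preferences):
--             if p in url:
--                 return i
--         return len(url_preferences) if url.startswith('https://') else len(url_preferences) + 1
--
--     # min is stable: the first url with the smallest rank wins,
--     # which reproduces the preference-major scan and both fallbacks
--     return min(urls, key=key)
-- ===== Notes on version B (the rewrite author's own statement) =====
-- stated objective: idiomatic
-- what changed: Replaces A's three staged scans (preference-major nested scan, then an https scan, then urls[0]) by one total ranking key (preference index, then https, then anything) and a single stable min(urls, key=rank), whose first-wins tie-break reproduces all of A's ordering rules.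
-- outside the precondition, e.g. on get_best_url_for_company({}): A raises KeyError, B raises KeyError
import Mathlib
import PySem

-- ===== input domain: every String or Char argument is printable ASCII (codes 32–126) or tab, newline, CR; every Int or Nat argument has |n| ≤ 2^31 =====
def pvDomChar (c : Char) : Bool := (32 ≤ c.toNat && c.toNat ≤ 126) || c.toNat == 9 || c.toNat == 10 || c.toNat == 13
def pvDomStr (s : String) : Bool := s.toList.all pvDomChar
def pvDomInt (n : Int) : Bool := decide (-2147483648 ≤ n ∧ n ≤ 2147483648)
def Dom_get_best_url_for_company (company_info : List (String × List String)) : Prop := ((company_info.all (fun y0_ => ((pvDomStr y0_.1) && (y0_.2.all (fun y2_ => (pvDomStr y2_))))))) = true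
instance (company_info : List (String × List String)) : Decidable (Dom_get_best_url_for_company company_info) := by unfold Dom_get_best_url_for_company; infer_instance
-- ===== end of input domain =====

-- B replaces A's staged scans by one stable min over a total ranking key (idiomatic; equal on the stated Pre_).


-- ===== PORT A =====
def pvPrefsA : List String :=
  ["boards.greenhouse.io", "job-boards.greenhouse.io", "jobs.lever.co",
   "myworkdayjobs.com", "careers.com", "jobs.com", "bamboohr.com",
   "workatastartup.com", "wellfound.com"]

-- 'for preference in url_preferences: for url in urls: if preference in url: return url'
def pvScanPrefs : List String → List String → Option String
  | [], _ => none
  | p :: ps, urls =>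
    match urls.find? (fun u => PySem.Str.isIn p u) with
    | some u => some u
    | none => pvScanPrefs ps urls

def get_best_url_for_company (company_info : List (String × List String)) : Option String :=
  match PySem.Dict.get? (PySem.Dict.mk company_info) "urls" with
  | none => none   -- KeyError in Python; excluded by Pre_
  | some urls =>
    match urls with
    | [] => none
    | [u0] => some u0             -- len(urls) == 1: return urls[0]
    | u0 :: _ =>
        match pvScanPrefs pvPrefsA urls with
        | some u => some u
        | none =>
          match urls.find? (fun u => PySem.Str.startswith u "https://") with
          | some u => some u
          | none => some u0       -- return urls[0]

-- ===== PORT B =====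
def pvPrefsB : List String :=
  ["boards.greenhouse.io", "job-boards.greenhouse.io", "jobs.lever.co",
   "myworkdayjobs.com", "careers.com", "jobs.com", "bamboohr.com",
   "workatastartup.com", "wellfound.com"]

-- key(url): index of the first preference contained in url (structural recursion
-- counting the non-matching prefix), else len(prefs) for https urls, else len(prefs)+1
def pvKey : List String → String → Nat
  | [], u => if PySem.Str.startswith u "https://" then 0 else 1
  | p :: ps, u => if PySem.Str.isIn p u then 0 else 1 + pvKey ps u

-- 'if not urls: return None' then 'return min(urls, key=key)' —
-- PySem.List.min? is Python's stable min(…, key=…) (first minimal element wins)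
def get_best_url_for_company_alt (company_info : List (String × List String)) : Option String :=
  Option.elim (PySem.Dict.get? (PySem.Dict.mk company_info) "urls")
    none   -- KeyError in Python; excluded by Pre_
    (fun urls => if urls.isEmpty then none else PySem.List.min? urls (pvKey pvPrefsB))

-- ===== PRECONDITION & SPEC =====
-- Pre_ excludes exactly the dicts without key 'urls', on which Python's company_info['urls'] raises KeyError.
def Pre_get_best_url_for_company (company_info : List (String × List String)) : Prop :=
  PySem.Dict.contains (PySem.Dict.mk company_info) "urls" = true
instance (company_info : List (String × List String)) : Decidable (Pre_get_best_url_for_company company_info) := by unfold Pre_get_best_url_for_company; infer_instance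

def pvWitness_get_best_url_for_company : (List (String × List String)) :=
  [("urls", ["https://jobs.lever.co/acme", "boards.greenhouse.io/acme"])]

def Spec_get_best_url_for_company (company_info : List (String × List String)) (out : Option String) : Prop := out = get_best_url_for_company_alt company_info
instance (company_info : List (String × List String)) (out : Option String) : Decidable (Spec_get_best_url_for_company company_info out) := by unfold Spec_get_best_url_for_company; infer_instance

-- ===== CLAIM =====
def Claim_equal_get_best_url_for_company : Prop := ∀ (company_info : List (String × List String)), Dom_get_best_url_for_company company_info → Pre_get_best_url_for_company company_info → Spec_get_best_url_for_company company_info (get_best_url_for_company company_info)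

-- ===== LEMMAS AND PROOFS =====

-- the step function of PySem.List.min?
def pvStep (f : String → Nat) (acc : Option String) (x : String) : Option String :=
  match acc with
  | none => some x
  | some m => if f x < f m then some x else some m

theorem pvMin?_eq_foldl (f : String → Nat) (urls : List String) :
    PySem.List.min? urls f = urls.foldl (pvStep f) none := by
  unfold PySem.List.min? pvStep
  congr 1
  funext acc x
  cases acc with
  | none => rfl
  | some m => by_cases h : f x < f m <;> simp [h]

-- once the accumulator's key is a lower bound of all remaining keys, it stays
theorem pvFold_stay (f : String → Nat) (urls : List String) (m : String)
    (h : ∀ u ∈ urls, ¬ f u < f m) : urls.foldl (pvStep f) (some m) = some m := by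
  induction urls with
  | nil => rfl
  | cons u rest ih =>
    simp only [List.foldl, pvStep]
    rw [if_neg (h u (List.mem_cons_self))]
    exact ih (fun v hv => h v (List.mem_cons_of_mem _ hv))

-- the first url of key 0 wins the fold, from none or from any acc of nonzero key
theorem pvFold_zero_wins (f : String → Nat) (urls : List String) (u : String)
    (hf : urls.find? (fun v => f v == 0) = some u) :
    urls.foldl (pvStep f) none = some u ∧
    ∀ m, f m ≠ 0 → urls.foldl (pvStep f) (some m) = some u := by
  induction urls with
  | nil => simp at hf
  | cons u0 rest ih =>
    rw [List.find?_cons] at hf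
    cases hb : (f u0 == 0) with
    | true =>
      rw [hb] at hf
      have h0 : f u0 = 0 := by simpa using hb
      have hu : u0 = u := Option.some.inj hf
      subst hu
      have hstay : rest.foldl (pvStep f) (some u0) = some u0 :=
        pvFold_stay f rest u0 (fun v _ => by omega)
      refine ⟨by simpa [List.foldl, pvStep] using hstay, ?_⟩
      intro m hm
      simp only [List.foldl, pvStep]
      rw [if_pos (by omega)]
      exact hstay
    | false =>
      rw [hb] at hf
      have h0 : f u0 ≠ 0 := by simpa using hb
      obtain ⟨ih1, ih2⟩ := ih hf
      refine ⟨by simpa [List.foldl, pvStep] using ih2 u0 h0, ?_⟩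
      intro m hm
      simp only [List.foldl, pvStep]
      by_cases hlt : f u0 < f m
      · rw [if_pos hlt]; exact ih2 u0 h0
      · rw [if_neg hlt]; exact ih2 m hm

-- keys shifted by one on every list element: the argmin fold is unchanged
theorem pvFold_shift (f g : String → Nat) (urls : List String)
    (h : ∀ u ∈ urls, f u = 1 + g u) :
    urls.foldl (pvStep f) none = urls.foldl (pvStep g) none ∧
    ∀ m, f m = 1 + g m → urls.foldl (pvStep f) (some m) = urls.foldl (pvStep g) (some m) := by
  induction urls with
  | nil => exact ⟨rfl, fun _ _ => rfl⟩
  | cons u rest ih =>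
    obtain ⟨ih1, ih2⟩ := ih (fun v hv => h v (List.mem_cons_of_mem _ hv))
    have hu : f u = 1 + g u := h u (List.mem_cons_self)
    refine ⟨by simpa [List.foldl, pvStep] using ih2 u hu, ?_⟩
    intro m hm
    simp only [List.foldl, pvStep]
    by_cases hlt : g u < g m
    · rw [if_pos (by omega), if_pos hlt]; exact ih2 u hu
    · rw [if_neg (by omega), if_neg hlt]; exact ih2 m hm

-- A's staged scans, as one function of the preference list
def pvScanAll (ps : List String) (u0 : String) (urls : List String) : Option String :=
  match pvScanPrefs ps urls with
  | some u => some u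
  | none =>
    match urls.find? (fun u => PySem.Str.startswith u "https://") with
    | some u => some u
    | none => some u0

-- MAIN: the stable argmin over pvKey computes exactly A's staged scans
theorem pvMin_eq_scanAll (ps : List String) (u0 : String) (rest : List String) :
    PySem.List.min? (u0 :: rest) (pvKey ps) = pvScanAll ps u0 (u0 :: rest) := by
  induction ps with
  | nil =>
    rw [pvMin?_eq_foldl]
    rcases hfind : (u0 :: rest).find? (fun u => PySem.Str.startswith u "https://") with _ | u
    · -- no https url: every key is 1, the first url wins
      have hall : ∀ u ∈ (u0 :: rest), pvKey [] u = 1 := by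
        intro v hv
        have := List.find?_eq_none.mp hfind v hv
        simp only [pvKey]
        rw [if_neg (by simpa using this)]
      have : rest.foldl (pvStep (pvKey [])) (some u0) = some u0 := by
        refine pvFold_stay _ rest u0 (fun v hv => ?_)
        rw [hall v (List.mem_cons_of_mem _ hv), hall u0 (List.mem_cons_self)]
        omega
      simp only [List.foldl, pvStep, pvScanAll, pvScanPrefs, hfind]
      exact this
    · -- first https url has key 0 and wins
      have hf0 : (u0 :: rest).find? (fun v => pvKey [] v == 0) = some u := by
        have : (fun v => pvKey [] v == 0) = (fun v => PySem.Str.startswith v "https://") := by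
          funext v
          simp only [pvKey]
          cases hv : PySem.Str.startswith v "https://" <;> simp_all
        rw [this]; exact hfind
      have := (pvFold_zero_wins (pvKey []) (u0 :: rest) u hf0).1
      simp only [pvScanAll, pvScanPrefs, hfind]
      exact this
  | cons p ps ih =>
    rcases hfind : (u0 :: rest).find? (fun v => PySem.Str.isIn p v) with _ | u
    · -- p matches no url: keys all shift by one, the scan skips p
      have hall : ∀ u ∈ (u0 :: rest), pvKey (p :: ps) u = 1 + pvKey ps u := by
        intro v hv
        have := List.find?_eq_none.mp hfind v hv
        simp only [pvKey]
        rw [if_neg (by simpa using this)]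
      rw [pvMin?_eq_foldl]
      rw [(pvFold_shift (pvKey (p :: ps)) (pvKey ps) (u0 :: rest) hall).1]
      rw [← pvMin?_eq_foldl, ih]
      simp only [pvScanAll, pvScanPrefs, hfind]
    · -- the first url containing p has key 0 and wins; A returns it from the scan
      have hf0 : (u0 :: rest).find? (fun v => pvKey (p :: ps) v == 0) = some u := by
        have : (fun v => pvKey (p :: ps) v == 0) = (fun v => PySem.Str.isIn p v) := by
          funext v
          simp only [pvKey]
          cases hv : PySem.Str.isIn p v <;> simp_all
        rw [this]; exact hfind
      have := (pvFold_zero_wins (pvKey (p :: ps)) (u0 :: rest) u hf0).1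
      rw [pvMin?_eq_foldl]
      simp only [pvScanAll, pvScanPrefs, hfind]
      exact this

-- ===== VERDICT =====
theorem get_best_url_for_company_spec : Claim_equal_get_best_url_for_company := by
  intro ci _ _
  show get_best_url_for_company ci = get_best_url_for_company_alt ci
  unfold get_best_url_for_company get_best_url_for_company_alt
  rcases PySem.Dict.get? (PySem.Dict.mk ci) "urls" with _ | urls
  · rfl
  · cases urls with
    | nil => rfl
    | cons u0 rest =>
      simp only [Option.elim, List.isEmpty_cons, if_neg Bool.false_ne_true]
      have hmain := pvMin_eq_scanAll pvPrefsB u0 rest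
      cases rest with
      | nil =>
        -- singleton: A returns urls[0]; min? on a one-element list returns it
        show some u0 = PySem.List.min? [u0] (pvKey pvPrefsB)
        simp [PySem.List.min?]
      | cons u1 rest' =>
        show _ = PySem.List.min? (u0 :: u1 :: rest') (pvKey pvPrefsB)
        rw [hmain]
        rfl
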